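-- pv_equiv track=rewrite | github.com/paasforest/proconnectsa-platform | backend/leads/services.py | get_province_from_city
-- ===== SOURCE A (Python) =====
-- def get_province_from_city(city):
--     """Get South African province from city name"""
--     city_lower = city.lower()
--
--     province_mapping = {
--         'western cape': ['cape town', 'george', 'knysna', 'mossel bay', 'oudtshoorn', 'stellenbosch', 'paarl', 'somerset west'],
--         'gauteng': ['johannesburg', 'pretoria', 'soweto', 'sandton', 'randburg', 'centurion', 'midrand', 'benoni', 'kempton park'],
--         'kwazulu-natal': ['durban', 'pietermaritzburg', 'newcastle', 'richards bay', 'empangeni', 'ballito', 'umhlanga'],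
--         'eastern cape': ['port elizabeth', 'east london', 'grahamstown', 'gqeberha', 'nelson mandela bay'],
--         'free state': ['bloemfontein', 'welkom', 'bethlehem', 'kroonstad', 'sasolburg'],
--         'mpumalanga': ['nelspruit', 'witbank', 'secunda', 'standerton', 'mbombela'],
--         'limpopo': ['polokwane', 'tzaneen', 'modimolle', 'bela-bela', 'lephalale'],
--         'northern cape': ['kimberley', 'upington', 'springbok', 'de aar', 'kathu'],
--         'north west': ['mahikeng', 'klerksdorp', 'potchefstroom', 'rustenburg', 'mafikeng']
--     }
--
--     for province, cities in province_mapping.items():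
--         if city_lower in cities:
--             return province.title()
--
--     return None
-- ===== SOURCE B (Python) =====
-- # B: one flat reverse-lookup dict (city -> title-cased province) built once at module
-- # level; the function is a single dict lookup instead of A's per-province list scans.
-- _CITY_TO_PROVINCE = {
--     'cape town': 'Western Cape',
--     'george': 'Western Cape',
--     'knysna': 'Western Cape',
--     'mossel bay': 'Western Cape',
--     'oudtshoorn': 'Western Cape',
--     'stellenbosch': 'Western Cape',
--     'paarl': 'Western Cape',
--     'somerset west': 'Western Cape',
--     'johannesburg': 'Gauteng',
--     'pretoria': 'Gauteng',
--     'soweto': 'Gauteng',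
--     'sandton': 'Gauteng',
--     'randburg': 'Gauteng',
--     'centurion': 'Gauteng',
--     'midrand': 'Gauteng',
--     'benoni': 'Gauteng',
--     'kempton park': 'Gauteng',
--     'durban': 'Kwazulu-Natal',
--     'pietermaritzburg': 'Kwazulu-Natal',
--     'newcastle': 'Kwazulu-Natal',
--     'richards bay': 'Kwazulu-Natal',
--     'empangeni': 'Kwazulu-Natal',
--     'ballito': 'Kwazulu-Natal',
--     'umhlanga': 'Kwazulu-Natal',
--     'port elizabeth': 'Eastern Cape',
--     'east london': 'Eastern Cape',
--     'grahamstown': 'Eastern Cape',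
--     'gqeberha': 'Eastern Cape',
--     'nelson mandela bay': 'Eastern Cape',
--     'bloemfontein': 'Free State',
--     'welkom': 'Free State',
--     'bethlehem': 'Free State',
--     'kroonstad': 'Free State',
--     'sasolburg': 'Free State',
--     'nelspruit': 'Mpumalanga',
--     'witbank': 'Mpumalanga',
--     'secunda': 'Mpumalanga',
--     'standerton': 'Mpumalanga',
--     'mbombela': 'Mpumalanga',
--     'polokwane': 'Limpopo',
--     'tzaneen': 'Limpopo',
--     'modimolle': 'Limpopo',
--     'bela-bela': 'Limpopo',
--     'lephalale': 'Limpopo',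
--     'kimberley': 'Northern Cape',
--     'upington': 'Northern Cape',
--     'springbok': 'Northern Cape',
--     'de aar': 'Northern Cape',
--     'kathu': 'Northern Cape',
--     'mahikeng': 'North West',
--     'klerksdorp': 'North West',
--     'potchefstroom': 'North West',
--     'rustenburg': 'North West',
--     'mafikeng': 'North West',
-- }
--
--
-- def get_province_from_city(city):
--     """Get South African province from city name"""
--     return _CITY_TO_PROVINCE.get(city.lower())
-- ===== Notes on version B (the rewrite author's own statement) =====
-- stated objective: idiomatic
-- what changed: Replaced A's loop over nine (province, city-list) pairs with a single flat reverse dict (lowercase city -> title-cased province) built once at module level, so the function body is one dict lookup with no per-province scan and no runtime title().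
import Mathlib
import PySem

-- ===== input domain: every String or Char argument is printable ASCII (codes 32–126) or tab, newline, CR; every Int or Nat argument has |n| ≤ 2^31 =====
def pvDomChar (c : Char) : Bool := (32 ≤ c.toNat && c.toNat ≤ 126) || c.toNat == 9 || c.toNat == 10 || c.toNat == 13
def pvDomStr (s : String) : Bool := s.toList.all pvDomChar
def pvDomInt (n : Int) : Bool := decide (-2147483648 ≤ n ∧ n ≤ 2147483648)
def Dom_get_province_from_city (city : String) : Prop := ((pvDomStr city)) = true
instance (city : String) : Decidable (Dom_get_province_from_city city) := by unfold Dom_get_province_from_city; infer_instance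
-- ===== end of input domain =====

-- B replaces A's scan over nine (province, city-list) pairs by a single flat
-- reverse-lookup dict built once; same return value for every input.

-- ===== PORT A =====
-- str.title() ported by hand (no PySem primitive): uppercase a letter after a
-- non-letter, lowercase a letter after a letter; exact on the ASCII domain.
def titleChars (prevAlpha : Bool) : List Char → List Char
  | [] => []
  | c :: t =>
    if PySem.Chars.isalpha c then
      (if prevAlpha then PySem.Chars.lowerChar c else PySem.Chars.upperChar c) :: titleChars true t
    else
      c :: titleChars false t

def pyTitle (s : String) : String := String.ofList (titleChars false s.toList)

def provinceMapping : List (String × List String) := [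
  ("western cape", ["cape town", "george", "knysna", "mossel bay", "oudtshoorn", "stellenbosch", "paarl", "somerset west"]),
  ("gauteng", ["johannesburg", "pretoria", "soweto", "sandton", "randburg", "centurion", "midrand", "benoni", "kempton park"]),
  ("kwazulu-natal", ["durban", "pietermaritzburg", "newcastle", "richards bay", "empangeni", "ballito", "umhlanga"]),
  ("eastern cape", ["port elizabeth", "east london", "grahamstown", "gqeberha", "nelson mandela bay"]),
  ("free state", ["bloemfontein", "welkom", "bethlehem", "kroonstad", "sasolburg"]),
  ("mpumalanga", ["nelspruit", "witbank", "secunda", "standerton", "mbombela"]),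
  ("limpopo", ["polokwane", "tzaneen", "modimolle", "bela-bela", "lephalale"]),
  ("northern cape", ["kimberley", "upington", "springbok", "de aar", "kathu"]),
  ("north west", ["mahikeng", "klerksdorp", "potchefstroom", "rustenburg", "mafikeng"])]

-- the 'for province, cities in …: if city_lower in cities: return province.title()' loop
def provinceScan : List (String × List String) → String → Option String
  | [], _ => none
  | (province, cities) :: rest, cityLower =>
    if cities.contains cityLower then some (pyTitle province) else provinceScan rest cityLower

def get_province_from_city (city : String) : Option String :=
  provinceScan provinceMapping (PySem.Str.lower city)

-- ===== PORT B =====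
-- Source B's module-level flat dict literal _CITY_TO_PROVINCE
def cityToProvince : PySem.Dict String String := PySem.Dict.mk [
  ("cape town", "Western Cape"),
  ("george", "Western Cape"),
  ("knysna", "Western Cape"),
  ("mossel bay", "Western Cape"),
  ("oudtshoorn", "Western Cape"),
  ("stellenbosch", "Western Cape"),
  ("paarl", "Western Cape"),
  ("somerset west", "Western Cape"),
  ("johannesburg", "Gauteng"),
  ("pretoria", "Gauteng"),
  ("soweto", "Gauteng"),
  ("sandton", "Gauteng"),
  ("randburg", "Gauteng"),
  ("centurion", "Gauteng"),
  ("midrand", "Gauteng"),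
  ("benoni", "Gauteng"),
  ("kempton park", "Gauteng"),
  ("durban", "Kwazulu-Natal"),
  ("pietermaritzburg", "Kwazulu-Natal"),
  ("newcastle", "Kwazulu-Natal"),
  ("richards bay", "Kwazulu-Natal"),
  ("empangeni", "Kwazulu-Natal"),
  ("ballito", "Kwazulu-Natal"),
  ("umhlanga", "Kwazulu-Natal"),
  ("port elizabeth", "Eastern Cape"),
  ("east london", "Eastern Cape"),
  ("grahamstown", "Eastern Cape"),
  ("gqeberha", "Eastern Cape"),
  ("nelson mandela bay", "Eastern Cape"),
  ("bloemfontein", "Free State"),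
  ("welkom", "Free State"),
  ("bethlehem", "Free State"),
  ("kroonstad", "Free State"),
  ("sasolburg", "Free State"),
  ("nelspruit", "Mpumalanga"),
  ("witbank", "Mpumalanga"),
  ("secunda", "Mpumalanga"),
  ("standerton", "Mpumalanga"),
  ("mbombela", "Mpumalanga"),
  ("polokwane", "Limpopo"),
  ("tzaneen", "Limpopo"),
  ("modimolle", "Limpopo"),
  ("bela-bela", "Limpopo"),
  ("lephalale", "Limpopo"),
  ("kimberley", "Northern Cape"),
  ("upington", "Northern Cape"),
  ("springbok", "Northern Cape"),
  ("de aar", "Northern Cape"),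
  ("kathu", "Northern Cape"),
  ("mahikeng", "North West"),
  ("klerksdorp", "North West"),
  ("potchefstroom", "North West"),
  ("rustenburg", "North West"),
  ("mafikeng", "North West")]

def get_province_from_city_alt (city : String) : Option String :=
  cityToProvince.get? (PySem.Str.lower city)

-- ===== PRECONDITION & SPEC =====
def Spec_get_province_from_city (city : String) (out : Option String) : Prop := out = get_province_from_city_alt city
instance (city : String) (out : Option String) : Decidable (Spec_get_province_from_city city out) := by unfold Spec_get_province_from_city; infer_instance

-- ===== CLAIM (what is proved, stated in full; the proofs are below) =====
def Claim_equal_get_province_from_city : Prop := ∀ (city : String), Dom_get_province_from_city city → Spec_get_province_from_city city (get_province_from_city city)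

-- ===== LEMMAS AND PROOFS =====

-- looking up s in a run of keys that all map to v, followed by rest
lemma get?_mk_run (cs : List String) (v : String) (rest : List (String × String)) (s : String) :
    (PySem.Dict.mk ((cs.map fun c => (c, v)) ++ rest)).get? s
      = if cs.contains s then some v else (PySem.Dict.mk rest).get? s := by
  induction cs with
  | nil => simp
  | cons c t ih =>
    simp only [List.map_cons, List.cons_append, PySem.Dict.get?_mk_cons, ih, List.contains_cons]
    by_cases h : s = c
    · simp [h]
    · have hb : (c == s) = false := beq_eq_false_iff_ne.mpr (fun e => h e.symm)
      by_cases ht : s ∈ t <;> simp [hb, h, ht]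

-- A's per-province scan equals lookup in the flattened association list
lemma scan_eq_flat (m : List (String × List String)) (s : String) :
    provinceScan m s
      = (PySem.Dict.mk (m.flatMap fun pc => pc.2.map fun c => (c, pyTitle pc.1))).get? s := by
  induction m with
  | nil => simp [provinceScan, PySem.Dict.get?]
  | cons pc rest ih =>
    obtain ⟨p, cs⟩ := pc
    simp only [provinceScan, List.flatMap_cons, get?_mk_run, ih]

-- B's dict literal is exactly A's mapping flattened with title() applied
lemma dict_eq :
    PySem.Dict.mk (provinceMapping.flatMap fun pc => pc.2.map fun c => (c, pyTitle pc.1))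
      = cityToProvince := by rfl

-- ===== VERDICT (by name: the statement is the Claim_ definition above) =====
theorem get_province_from_city_spec : Claim_equal_get_province_from_city := by
  intro city _
  show _ = _
  rw [get_province_from_city, get_province_from_city_alt, scan_eq_flat, dict_eq]
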